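-- pv_equiv track=rewrite | github.com/j3ang/VandyHack2018-vanderbilt-university | PythonScripts/VandyHack/DataCollection/Sentiment/test_sentiment_data.py | token_feature
-- ===== SOURCE A (Python) =====
-- from collections import Counter
-- from itertools import chain, combinations
--
-- neg_words = set(['bad', 'hate', 'horrible', 'worst', 'boring'])
--
-- pos_words = set(['awesome', 'amazing', 'best', 'good', 'great', 'love', 'wonderful'])
--
-- def token_feature(doc_tokens, k=3):
--     c = Counter(doc_tokens)
--     feats = {}
--     for token in doc_tokens:
--         feats['has(%s)'%(token)] = c[token]
--
--     #lexicon feature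
--     n = 0;
--     p = 0;
--     for token in doc_tokens:
--         if token.lower() in neg_words:
--             n += 1
--         if token.lower() in pos_words:
--             p += 1
--     feats['neg_words'] = n
--     feats['pos_words'] = p
--
--     #token_pair_feature
--     for i in range(0, len(doc_tokens) - k + 1):
--         a = doc_tokens[i : i + k]
--         for co in combinations(a,2):
--             key = 'token_pair=%s__%s' % (co[0],co[1])
--             if key in feats:
--                 feats[key] = feats[key] + 1
--             else:
--                 feats[key] = 1
--
--
--     return feats
-- ===== SOURCE B (Python) =====
-- from collections import Counter
--
-- neg_words = set(['bad', 'hate', 'horrible', 'worst', 'boring'])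
--
-- pos_words = set(['awesome', 'amazing', 'best', 'good', 'great', 'love', 'wonderful'])
--
-- def token_feature(doc_tokens, k=3):
--     c = Counter(doc_tokens)
--     feats = {}
--     for token in doc_tokens:
--         feats['has(%s)' % token] = c[token]
--
--     # lexicon feature, as two sums over the lowered tokens
--     lows = [t.lower() for t in doc_tokens]
--     feats['neg_words'] = sum(t in neg_words for t in lows)
--     feats['pos_words'] = sum(t in pos_words for t in lows)
--
--     # token_pair feature: visit each position pair once, weighted by the number
--     # of k-windows containing both positions (no window expansion).
--     L = len(doc_tokens)
--     if k >= 2 and k <= L: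
--         W = L - k  # index of the last window
--
--         def bump(p, q, m):
--             key = 'token_pair=%s__%s' % (doc_tokens[p], doc_tokens[q])
--             feats[key] = feats.get(key, 0) + m
--
--         # pairs first seen in window 0 (both positions below k)
--         for p in range(k - 1):
--             for q in range(p + 1, k):
--                 bump(p, q, min(p, W) + 1)
--         # window i (i >= 1) introduces exactly the pairs ending at q = i+k-1
--         for i in range(1, W + 1):
--             q = i + k - 1
--             for p in range(i, q):
--                 bump(p, q, min(p, W) - i + 1)
--     return feats
-- ===== Notes on version B (the rewrite author's own statement) =====
-- stated objective: alternative
-- what changed: The sliding-window pair loop that expands every k-window and bumps each pair key by 1 is replaced by a direct pass that visits each position pair (p,q) exactly once, in the same first-occurrence order, and adds its multiplicity min(p,L-k)-max(0,q-k+1)+1 (the number of windows containing both positions) in closed form; Pre_ excludes negative k with len+k>=2, where A's slice doc_tokens[i:i+k] wraps around a negative stop and emits accidental pair features.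
import Mathlib
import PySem

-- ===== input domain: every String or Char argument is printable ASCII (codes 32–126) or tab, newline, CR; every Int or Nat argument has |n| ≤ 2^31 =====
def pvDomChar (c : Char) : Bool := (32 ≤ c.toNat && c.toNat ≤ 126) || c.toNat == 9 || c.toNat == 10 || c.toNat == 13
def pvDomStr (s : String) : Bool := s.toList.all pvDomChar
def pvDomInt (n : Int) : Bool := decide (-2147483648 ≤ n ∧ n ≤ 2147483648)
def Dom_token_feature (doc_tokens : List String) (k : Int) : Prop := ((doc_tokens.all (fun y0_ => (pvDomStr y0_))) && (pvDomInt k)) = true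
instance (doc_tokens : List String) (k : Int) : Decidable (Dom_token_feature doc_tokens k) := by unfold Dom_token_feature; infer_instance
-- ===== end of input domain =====

-- B replaces A's window-expansion pair loop by one weighted visit per position pair
-- (weight = number of k-windows containing both positions): an alternative algorithm for the same dict.

-- ===== PORT A =====

def pvNegWords : List String := ["bad", "hate", "horrible", "worst", "boring"]

def pvPosWords : List String := ["awesome", "amazing", "best", "good", "great", "love", "wonderful"]

/-- itertools.combinations(l, 2), in itertools' order. -/
def pvCombos2 {α : Type} : List α → List (α × α)
  | [] => []
  | x :: xs => (xs.map (fun y => (x, y))) ++ pvCombos2 xs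

def token_feature (doc_tokens : List String) (k : Int) : List (String × Int) :=
  let c := PySem.Dict.counter doc_tokens
  let feats : PySem.Dict String Int := PySem.Dict.empty
  let feats := doc_tokens.foldl (fun d token => d.insert ("has(" ++ token ++ ")") (c.getD token 0)) feats
  -- lexicon feature
  let np : Int × Int := doc_tokens.foldl (fun np token =>
      let np := if PySem.Str.lower token ∈ pvNegWords then (np.1 + 1, np.2) else np
      if PySem.Str.lower token ∈ pvPosWords then (np.1, np.2 + 1) else np) (0, 0)
  let feats := feats.insert "neg_words" np.1
  let feats := feats.insert "pos_words" np.2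
  -- token_pair_feature
  let feats := (PySem.List.pyRange 0 ((doc_tokens.length : Int) - k + 1) 1).foldl (fun d i =>
      let a := PySem.List.slice doc_tokens (some i) (some (i + k))
      (pvCombos2 a).foldl (fun d co =>
        let key := "token_pair=" ++ co.1 ++ "__" ++ co.2
        if d.contains key then d.insert key (d.getD key 0 + 1) else d.insert key 1) d) feats
  feats.items

-- ===== PORT B =====

def token_feature_alt (doc_tokens : List String) (k : Int) : List (String × Int) :=
  let c := PySem.Dict.counter doc_tokens
  let feats : PySem.Dict String Int := PySem.Dict.empty
  let feats := doc_tokens.foldl (fun d token => d.insert ("has(" ++ token ++ ")") (c.getD token 0)) feats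
  -- lexicon feature, as two sums over the lowered tokens
  let lows := doc_tokens.map PySem.Str.lower
  let feats := feats.insert "neg_words" ((lows.map (fun t => if t ∈ pvNegWords then (1 : Int) else 0)).sum)
  let feats := feats.insert "pos_words" ((lows.map (fun t => if t ∈ pvPosWords then (1 : Int) else 0)).sum)
  -- token_pair feature: each position pair once, weighted by how many k-windows contain it
  let L : Int := doc_tokens.length
  let feats :=
    if 2 ≤ k ∧ k ≤ L then
      let W := L - k
      let bump := fun (d : PySem.Dict String Int) (p q m : Int) =>
        let key := "token_pair=" ++ PySem.List.pyGetD doc_tokens p "" ++ "__" ++ PySem.List.pyGetD doc_tokens q ""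
        d.insert key (d.getD key 0 + m)
      let feats := (PySem.List.pyRange 0 (k - 1) 1).foldl (fun d p =>
          (PySem.List.pyRange (p + 1) k 1).foldl (fun d q => bump d p q (min p W + 1)) d) feats
      (PySem.List.pyRange 1 (W + 1) 1).foldl (fun d i =>
          let q := i + k - 1
          (PySem.List.pyRange i q 1).foldl (fun d p => bump d p q (min p W - i + 1)) d) feats
    else feats
  feats.items

-- ===== PRECONDITION & SPEC =====
-- Pre_ excludes exactly the inputs where A's slice doc_tokens[i:i+k] wraps around a negative
-- stop (k < 0 with len+k >= 2), producing accidental pair features from a window no caller asked for.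
def Pre_token_feature (doc_tokens : List String) (k : Int) : Prop :=
  0 ≤ k ∨ (doc_tokens.length : Int) + k ≤ 1
instance (doc_tokens : List String) (k : Int) : Decidable (Pre_token_feature doc_tokens k) := by unfold Pre_token_feature; infer_instance

def pvWitness_token_feature : List String × Int := (["good", "bad", "x", "good"], 3)

def Spec_token_feature (doc_tokens : List String) (k : Int) (out : List (String × Int)) : Prop := out = token_feature_alt doc_tokens k
instance (doc_tokens : List String) (k : Int) (out : List (String × Int)) : Decidable (Spec_token_feature doc_tokens k out) := by unfold Spec_token_feature; infer_instance

-- ===== CLAIM (what is proved, stated in full; the proofs are below) =====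
def Claim_equal_token_feature : Prop := ∀ (doc_tokens : List String) (k : Int), Dom_token_feature doc_tokens k → Pre_token_feature doc_tokens k → Spec_token_feature doc_tokens k (token_feature doc_tokens k)

-- ===== LEMMAS AND PROOFS =====

def pvBump (d : PySem.Dict String Int) (e : String × Int) : PySem.Dict String Int :=
  d.insert e.1 (d.getD e.1 0 + e.2)

def pvFDA {α : Type} [DecidableEq α] (seen : List α) : List α → List α
  | [] => []
  | x :: xs => if x ∈ seen then pvFDA seen xs else x :: pvFDA (x :: seen) xs

/-- first-occurrence dedup -/
def pvFD {α : Type} [DecidableEq α] (l : List α) : List α := pvFDA [] l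

theorem pvFDA_congr {α : Type} [DecidableEq α] (l : List α) :
    ∀ (s s' : List α), (∀ a, a ∈ s ↔ a ∈ s') → pvFDA s l = pvFDA s' l := by
  induction l with
  | nil => intro s s' _; rfl
  | cons y r ih =>
    intro s s' h
    simp only [pvFDA]
    by_cases hy : y ∈ s
    · rw [if_pos hy, if_pos ((h y).1 hy)]; exact ih s s' h
    · rw [if_neg hy, if_neg (fun c => hy ((h y).2 c))]
      congr 1
      exact ih (y :: s) (y :: s') (by intro a; simp [h a])

theorem pvFDA_filter {α : Type} [DecidableEq α] (l : List α) :
    ∀ (s : List α) (x : α), pvFDA (x :: s) l = pvFDA s (l.filter (· ≠ x)) := by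
  induction l with
  | nil => intro s x; rfl
  | cons y r ih =>
    intro s x
    by_cases hyx : y = x
    · subst hyx
      have hfc : (y :: r).filter (· ≠ y) = r.filter (· ≠ y) := by simp
      rw [hfc, ← ih s y]
      simp [pvFDA]
    · have hfc : (y :: r).filter (· ≠ x) = y :: r.filter (· ≠ x) := by simp [hyx]
      rw [hfc]
      by_cases hys : y ∈ s
      · simp only [pvFDA, if_pos hys, if_pos (show y ∈ x :: s by simp [hys])]
        exact ih s x
      · simp only [pvFDA, if_neg hys, if_neg (show y ∉ x :: s by simp [hys, hyx])]
        congr 1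
        rw [pvFDA_congr r (y :: x :: s) (x :: y :: s)
              (by intro a; constructor <;> (intro h; simp at h ⊢; tauto))]
        exact ih (y :: s) x

theorem pvFD_nil {α : Type} [DecidableEq α] : pvFD ([] : List α) = [] := rfl

theorem pvFD_cons {α : Type} [DecidableEq α] (x : α) (xs : List α) :
    pvFD (x :: xs) = x :: pvFD (xs.filter (· ≠ x)) := by
  show pvFDA [] (x :: xs) = x :: pvFDA [] (xs.filter (· ≠ x))
  rw [show pvFDA ([] : List α) (x :: xs) = x :: pvFDA [x] xs by simp [pvFDA]]
  rw [show ([x] : List α) = (x :: ([] : List α)) from rfl, pvFDA_filter]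

theorem pvFD_induct {α : Type} [DecidableEq α] {motive : List α → Prop} (h1 : motive [])
    (h2 : ∀ x xs, motive (xs.filter (· ≠ x)) → motive (x :: xs)) : ∀ l, motive l := by
  have key : ∀ (n : ℕ) (l : List α), l.length ≤ n → motive l := by
    intro n
    induction n with
    | zero => intro l hl; rw [List.length_eq_zero_iff.1 (Nat.le_zero.1 hl)]; exact h1
    | succ n ih =>
      intro l hl
      cases l with
      | nil => exact h1
      | cons x xs =>
        exact h2 x xs (ih _ (le_trans (List.length_filter_le _ _) (by simpa using hl)))
  exact fun l => key l.length l le_rfl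


theorem pv_insert_getD_self (d : PySem.Dict String Int) (s : String)
    (hn : d.keys.Nodup) (hc : d.contains s = true) :
    d.insert s (d.getD s 0) = d := by
  apply PySem.Dict.ext
  rw [PySem.Dict.items_insert_of_contains d _ hc]
  have : ∀ p ∈ d.items, (if (p.1 == s) = true then (s, d.getD s 0) else p) = p := by
    intro p hp
    by_cases h : p.1 = s
    · subst h
      rw [PySem.Dict.getD_of_mem_items d (by simpa using hp) hn]
      simp
    · simp [h]
  calc List.map (fun p => if (p.1 == s) = true then (s, d.getD s 0) else p) d.items
      = List.map id d.items := List.map_congr_left this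
    _ = d.items := List.map_id d.items

theorem pvBump_zero (d : PySem.Dict String Int) (s : String)
    (hn : d.keys.Nodup) (hc : d.contains s = true) : pvBump d (s, 0) = d := by
  simp only [pvBump, add_zero]
  exact pv_insert_getD_self d s hn hc

theorem pvBump_combine (d : PySem.Dict String Int) (s : String) (a b : Int) :
    pvBump (pvBump d (s, a)) (s, b) = pvBump d (s, a + b) := by
  simp [pvBump, PySem.Dict.getD_insert_self, PySem.Dict.insert_insert_self, add_assoc]

theorem pv_insert_comm (d : PySem.Dict String Int) (s s' : String) (v w : Int)
    (hc : d.contains s = true) (hne : s' ≠ s) :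
    (d.insert s v).insert s' w = (d.insert s' w).insert s v := by
  apply PySem.Dict.ext
  by_cases hc' : d.contains s' = true
  · rw [PySem.Dict.items_insert_of_contains _ _ (by simp [PySem.Dict.contains_insert, hc']),
        PySem.Dict.items_insert_of_contains _ _ hc,
        PySem.Dict.items_insert_of_contains _ _ (by simp [PySem.Dict.contains_insert, hc]),
        PySem.Dict.items_insert_of_contains _ _ hc']
    simp only [List.map_map]
    apply List.map_congr_left
    intro p _
    by_cases h1 : p.1 = s
    · simp [Function.comp, h1, Ne.symm hne]
    · by_cases h2 : p.1 = s'
      · simp [Function.comp, h2, hne]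
      · simp [Function.comp, h1, h2]
  · have hcf : d.contains s' = false := by simpa using hc'
    rw [PySem.Dict.items_insert_of_not_contains _ _
          (by simp [PySem.Dict.contains_insert, hcf, hne]),
        PySem.Dict.items_insert_of_contains _ _ hc,
        PySem.Dict.items_insert_of_contains _ _
          (by simp [PySem.Dict.contains_insert, hc]),
        PySem.Dict.items_insert_of_not_contains _ _ hcf]
    simp [hne]

theorem pvBump_comm (d : PySem.Dict String Int) (s : String) (a : Int) (e : String × Int)
    (hc : d.contains s = true) :
    pvBump (pvBump d (s, a)) e = pvBump (pvBump d e) (s, a) := by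
  obtain ⟨t, b⟩ := e
  by_cases h : t = s
  · subst h
    rw [pvBump_combine, pvBump_combine, add_comm]
  · show pvBump (d.insert s (d.getD s 0 + a)) (t, b) = pvBump (d.insert t (d.getD t 0 + b)) (s, a)
    simp only [pvBump]
    rw [PySem.Dict.getD_insert_of_ne _ _ _ h, PySem.Dict.getD_insert_of_ne _ _ _ (Ne.symm h)]
    exact pv_insert_comm d s t _ _ hc h

theorem pv_contains_bump (d : PySem.Dict String Int) (e : String × Int) (s : String)
    (hc : d.contains s = true) : (pvBump d e).contains s = true := by
  simp [pvBump, PySem.Dict.contains_insert, hc]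

theorem pv_nodup_bump (d : PySem.Dict String Int) (e : String × Int)
    (hn : d.keys.Nodup) : (pvBump d e).keys.Nodup :=
  PySem.Dict.nodup_keys_insert _ _ _ hn

theorem pv_ext {α : Type} [DecidableEq α] (f : α → String) (x : α) (P : List α) :
    ∀ (d : PySem.Dict String Int), d.keys.Nodup → d.contains (f x) = true →
    List.foldl pvBump d (P.map (fun y => (f y, (1 : Int)))) =
      List.foldl pvBump (pvBump d (f x, (P.count x : Int)))
        ((P.filter (· ≠ x)).map (fun y => (f y, (1 : Int)))) := by
  induction P with
  | nil =>
    intro d hn hc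
    simpa using (pvBump_zero d (f x) hn hc).symm
  | cons y rest ih =>
    intro d hn hc
    by_cases hyx : y = x
    · subst hyx
      have h1 : List.count y (y :: rest) = List.count y rest + 1 := List.count_cons_self
      have h2 : (y :: rest).filter (· ≠ y) = rest.filter (· ≠ y) := by simp
      rw [h1, h2, List.map_cons, List.foldl_cons]
      rw [ih (pvBump d (f y, 1)) (pv_nodup_bump _ _ hn)
            (by simp [pvBump, PySem.Dict.contains_insert_self])]
      rw [pvBump_combine]
      push_cast
      ring_nf
    · have h1 : List.count x (y :: rest) = List.count x rest :=
        List.count_cons_of_ne hyx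
      have h2 : (y :: rest).filter (· ≠ x) = y :: rest.filter (· ≠ x) := by
        simp [hyx]
      rw [h1, h2, List.map_cons, List.foldl_cons, List.map_cons, List.foldl_cons]
      rw [ih (pvBump d (f y, 1)) (pv_nodup_bump _ _ hn) (pv_contains_bump _ _ _ hc)]
      rw [pvBump_comm d (f x) _ (f y, 1) hc]

theorem pv_mem_pvFD {α : Type} [DecidableEq α] (l : List α) : ∀ y ∈ pvFD l, y ∈ l := by
  induction l using pvFD_induct with
  | h1 => intro y hy; simp [pvFD, pvFDA] at hy
  | h2 x xs ih =>
    intro y hy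
    rw [pvFD_cons] at hy
    rcases List.mem_cons.1 hy with h | h
    · simp [h]
    · have := ih y h
      have := List.mem_of_mem_filter this
      simp [this]

theorem pv_G1 {α : Type} [DecidableEq α] (f : α → String) (P : List α) :
    ∀ (d : PySem.Dict String Int), d.keys.Nodup →
    List.foldl pvBump d (P.map (fun y => (f y, (1 : Int)))) =
      List.foldl pvBump d ((pvFD P).map (fun y => (f y, (P.count y : Int)))) := by
  induction P using pvFD_induct with
  | h1 => intro d _; rfl
  | h2 x xs ih =>
    intro d hn
    rw [List.map_cons, List.foldl_cons]
    rw [pv_ext f x xs (pvBump d (f x, 1)) (pv_nodup_bump _ _ hn)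
          (by simp [pvBump, PySem.Dict.contains_insert_self])]
    rw [pvBump_combine]
    rw [ih (pvBump d (f x, 1 + ↑(xs.count x))) (pv_nodup_bump _ _ hn)]
    rw [pvFD_cons, List.map_cons, List.foldl_cons]
    have hcnt : ((x :: xs).count x : Int) = 1 + ↑(xs.count x) := by
      rw [List.count_cons_self]; push_cast; ring
    rw [hcnt]
    congr 1
    apply List.map_congr_left
    intro y hy
    have hyy : y ∈ xs.filter (· ≠ x) := pv_mem_pvFD _ y hy
    have hne : y ≠ x := by
      have := List.of_mem_filter hyy
      simpa using this
    congr 1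
    rw [List.count_filter (by simpa using hne), List.count_cons_of_ne (Ne.symm hne)]

def pvLexPairs (a b : Int) : List (Int × Int) :=
  (PySem.List.pyRange a b 1).flatMap (fun p => (PySem.List.pyRange (p + 1) b 1).map (fun q => (p, q)))

def pvNews (i k : Int) : List (Int × Int) :=
  (PySem.List.pyRange i (i + k - 1) 1).map (fun p => (p, i + k - 1))

def pvPA (W k : Int) : List (Int × Int) :=
  (PySem.List.pyRange 0 (W + 1) 1).flatMap (fun i => pvLexPairs i (i + k))

theorem pvCombos2_map {α β : Type} (f : α → β) (l : List α) :
    pvCombos2 (l.map f) = (pvCombos2 l).map (Prod.map f f) := by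
  induction l with
  | nil => rfl
  | cons x xs ih => simp [pvCombos2, ih, List.map_map, Function.comp, Prod.map]

theorem pvLexPairs_eq_nil {a b : Int} (h : b ≤ a) : pvLexPairs a b = [] := by
  simp [pvLexPairs, PySem.List.pyRange_one_eq_nil h]

theorem pvLexPairs_cons {a b : Int} (h : a < b) :
    pvLexPairs a b = ((PySem.List.pyRange (a + 1) b 1).map (fun q => (a, q))) ++ pvLexPairs (a + 1) b := by
  simp [pvLexPairs, PySem.List.pyRange_one_cons h]

theorem pvCombos2_pyRange (n : ℕ) : ∀ (a b : Int), (b - a).toNat = n →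
    pvCombos2 (PySem.List.pyRange a b 1) = pvLexPairs a b := by
  induction n with
  | zero =>
    intro a b h
    have hba : b ≤ a := by omega
    simp [PySem.List.pyRange_one_eq_nil hba, pvCombos2, pvLexPairs_eq_nil hba]
  | succ n ih =>
    intro a b h
    have hab : a < b := by omega
    rw [PySem.List.pyRange_one_cons hab, pvLexPairs_cons hab]
    show (PySem.List.pyRange (a + 1) b 1).map (fun y => (a, y)) ++ pvCombos2 (PySem.List.pyRange (a + 1) b 1) = _
    rw [ih (a + 1) b (by omega)]

theorem pv_mem_lexPairs (x : Int × Int) (a b : Int) :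
    x ∈ pvLexPairs a b ↔ a ≤ x.1 ∧ x.1 < x.2 ∧ x.2 < b := by
  obtain ⟨p, q⟩ := x
  simp only [pvLexPairs, List.mem_flatMap, List.mem_map, PySem.List.mem_pyRange_one]
  constructor
  · rintro ⟨p', hp', q', hq', heq⟩
    obtain ⟨rfl, rfl⟩ := Prod.mk.inj heq
    exact ⟨hp'.1, by omega, hq'.2⟩
  · rintro ⟨h1, h2, h3⟩
    exact ⟨p, ⟨h1, by omega⟩, q, ⟨by omega, h3⟩, rfl⟩

theorem pv_nodup_lexPairs (n : ℕ) : ∀ (a b : Int), (b - a).toNat = n → (pvLexPairs a b).Nodup := by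
  induction n with
  | zero => intro a b h; simp [pvLexPairs_eq_nil (by omega : b ≤ a)]
  | succ n ih =>
    intro a b h
    have hab : a < b := by omega
    rw [pvLexPairs_cons hab, List.nodup_append]
    refine ⟨List.Nodup.map (fun q q' hqq => by simpa using hqq) (PySem.List.nodup_pyRange_one _ _),
      ih (a + 1) b (by omega), ?_⟩
    intro x hx y hy hxy
    obtain ⟨q, _, rfl⟩ := List.mem_map.1 hx
    rw [← hxy] at hy
    have := ((pv_mem_lexPairs _ (a + 1) b).1 hy).1
    simp at this

theorem pv_mem_news (x : Int × Int) (i k : Int) :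
    x ∈ pvNews i k ↔ i ≤ x.1 ∧ x.1 < i + k - 1 ∧ x.2 = i + k - 1 := by
  obtain ⟨p, q⟩ := x
  simp only [pvNews, List.mem_map, PySem.List.mem_pyRange_one]
  constructor
  · rintro ⟨p', hp', heq⟩
    obtain ⟨rfl, rfl⟩ := Prod.mk.inj heq
    exact ⟨hp'.1, hp'.2, rfl⟩
  · rintro ⟨h1, h2, h3⟩
    exact ⟨p, ⟨h1, h2⟩, by rw [h3]⟩

theorem pv_nodup_news (i k : Int) : (pvNews i k).Nodup :=
  List.Nodup.map (fun p p' h => by simpa using h) (PySem.List.nodup_pyRange_one _ _)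

/-- a range filtered to one value -/
theorem pv_filter_range_eq (a b Q : Int) (h1 : a ≤ Q) (h2 : Q < b) :
    (PySem.List.pyRange a b 1).filter (fun q => decide (Q ≤ q)) = PySem.List.pyRange Q b 1 := by
  rw [PySem.List.pyRange_one_append a Q b h1 (by omega), List.filter_append]
  rw [List.filter_eq_nil_iff.2 (fun q hq => by
        simp only [PySem.List.mem_pyRange_one] at hq; simp; omega)]
  rw [List.nil_append, List.filter_eq_self.2 (fun q hq => by
        simp only [PySem.List.mem_pyRange_one] at hq; simp; omega)]

/-- window i's pairs that are not in window i-1 are exactly the new ones (q = i+k-1) -/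
theorem pv_filter_window (i k : Int) (hk : 2 ≤ k) (_hi : 1 ≤ i) :
    (pvLexPairs i (i + k)).filter (fun x => decide (x ∉ pvLexPairs (i - 1) (i - 1 + k))) = pvNews i k := by
  have hcong : (pvLexPairs i (i + k)).filter (fun x => decide (x ∉ pvLexPairs (i - 1) (i - 1 + k)))
      = (pvLexPairs i (i + k)).filter (fun x => decide (i + k - 1 ≤ x.2)) := by
    apply List.filter_congr
    intro x hx
    have hb := (pv_mem_lexPairs x i (i + k)).1 hx
    simp only [decide_eq_decide, pv_mem_lexPairs]
    omega
  rw [hcong]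
  simp only [pvLexPairs, List.filter_flatMap, List.filter_map]
  have hsplit : PySem.List.pyRange i (i + k) 1
      = PySem.List.pyRange i (i + k - 1) 1 ++ [i + k - 1] := by
    have h := PySem.List.pyRange_one_succ_right (a := i) (b := i + k - 1) (by omega)
    rw [show i + k - 1 + 1 = i + k by ring] at h
    exact h
  rw [hsplit, List.flatMap_append]
  have hlast : ∀ p ∈ ([i + k - 1] : List Int),
      ((PySem.List.pyRange (p + 1) (i + k) 1).filter ((fun x : Int × Int => decide (i + k - 1 ≤ x.2)) ∘ (fun q => (p, q)))).map (fun q => ((p, q) : Int × Int)) = [] := by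
    intro p hp
    simp only [List.mem_singleton] at hp
    subst hp
    rw [List.filter_eq_nil_iff.2 (fun q hq => by
      simp only [PySem.List.mem_pyRange_one] at hq
      simp only [Function.comp_apply]
      simp
      omega)]
    rfl
  have hmain : ∀ p ∈ PySem.List.pyRange i (i + k - 1) 1,
      ((PySem.List.pyRange (p + 1) (i + k) 1).filter ((fun x : Int × Int => decide (i + k - 1 ≤ x.2)) ∘ (fun q => (p, q)))).map (fun q => ((p, q) : Int × Int)) = [(p, i + k - 1)] := by
    intro p hp
    simp only [PySem.List.mem_pyRange_one] at hp
    have hfe : ((fun x : Int × Int => decide (i + k - 1 ≤ x.2)) ∘ (fun q => ((p, q) : Int × Int))) = (fun q => decide (i + k - 1 ≤ q)) := rfl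
    rw [hfe, pv_filter_range_eq _ _ _ (by omega) (by omega)]
    have h1 : PySem.List.pyRange (i + k - 1) (i + k) 1 = [i + k - 1] := by
      have h := PySem.List.pyRange_one_singleton (a := i + k - 1)
      rw [show i + k - 1 + 1 = i + k by ring] at h
      exact h
    rw [h1]
    rfl
  rw [List.flatMap_congr hlast, List.flatMap_congr hmain,
      show (fun x : Int => [((x, i + k - 1) : Int × Int)]) = fun x => [(fun p => ((p, i + k - 1) : Int × Int)) x] from rfl,
      ← List.map_eq_flatMap]
  simp [pvNews]

theorem pvFD_nodup_id {α : Type} [DecidableEq α] (l : List α) (h : l.Nodup) : pvFD l = l := by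
  induction l using pvFD_induct with
  | h1 => rfl
  | h2 x xs ih =>
    rw [pvFD_cons]
    have hx : x ∉ xs := (List.nodup_cons.1 h).1
    have hf : xs.filter (· ≠ x) = xs :=
      List.filter_eq_self.2 (fun a ha => by simp; exact fun c => hx (c ▸ ha))
    rw [hf] at ih ⊢
    rw [ih (List.nodup_cons.1 h).2]

theorem pvFD_append {α : Type} [DecidableEq α] (X : List α) :
    ∀ (Y : List α), pvFD (X ++ Y) = pvFD X ++ pvFD (Y.filter (fun y => decide (y ∉ X))) := by
  induction X using pvFD_induct with
  | h1 =>
    intro Y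
    rw [List.nil_append, pvFD_nil, List.nil_append,
        List.filter_eq_self.2 (fun a _ => by simp)]
  | h2 x X' ih =>
    intro Y
    rw [List.cons_append, pvFD_cons, pvFD_cons, List.filter_append, ih (Y.filter (· ≠ x)),
        List.filter_filter]
    simp only [List.cons_append]
    congr 2
    apply congrArg pvFD
    apply List.filter_congr
    intro y _
    by_cases hyx : y = x
    · subst hyx; simp
    · simp [List.mem_filter, hyx]

theorem pv_window_induction (k W : Int) (hk : 2 ≤ k) :
    ∀ (n : ℕ) (i : Int), 1 ≤ i → (W + 1 - i).toNat = n →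
    pvFD (((PySem.List.pyRange i (W + 1) 1).flatMap (fun j => pvLexPairs j (j + k))).filter
          (fun x => decide (x ∉ pvLexPairs (i - 1) (i - 1 + k))))
      = (PySem.List.pyRange i (W + 1) 1).flatMap (fun j => pvNews j k) := by
  intro n
  induction n with
  | zero =>
    intro i hi hn
    rw [PySem.List.pyRange_one_eq_nil (by omega)]
    rfl
  | succ n ih =>
    intro i hi hn
    have hi2 : i < W + 1 := by omega
    rw [PySem.List.pyRange_one_cons hi2, List.flatMap_cons, List.filter_append,
        pv_filter_window i k hk hi, pvFD_append, pvFD_nodup_id _ (pv_nodup_news i k),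
        List.filter_filter, List.flatMap_cons]
    congr 1
    refine Eq.trans (congrArg pvFD (List.filter_congr (fun x hx => ?_)))
      (ih (i + 1) (by omega) (by omega))
    obtain ⟨j, hj, hxj⟩ := List.mem_flatMap.1 hx
    rw [PySem.List.mem_pyRange_one] at hj
    have hb := (pv_mem_lexPairs x j (j + k)).1 hxj
    rw [← Bool.decide_and, decide_eq_decide]
    simp only [pv_mem_lexPairs, pv_mem_news]
    omega

theorem pvFD_pvPA (k W : Int) (hk : 2 ≤ k) (hW : 0 ≤ W) :
    pvFD (pvPA W k) = pvLexPairs 0 (0 + k) ++ (PySem.List.pyRange 1 (W + 1) 1).flatMap (fun j => pvNews j k) := by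
  rw [pvPA, PySem.List.pyRange_one_cons (by omega : (0 : Int) < W + 1), List.flatMap_cons,
      pvFD_append, pvFD_nodup_id _ (pv_nodup_lexPairs (0 + k - 0).toNat 0 (0 + k) rfl)]
  congr 1
  have h := pv_window_induction k W hk (W + 1 - 1).toNat 1 (by omega) rfl
  rw [show (1 : Int) - 1 = 0 by ring] at h
  exact Eq.trans (congrArg pvFD (List.filter_congr fun x _ => decide_eq_decide.mpr Iff.rfl)) h

theorem pv_sum_indicator (lo hi a : Int) : ∀ (n : ℕ),
    ((PySem.List.pyRange a (a + n) 1).map (fun j => if lo ≤ j ∧ j ≤ hi then (1 : ℕ) else 0)).sum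
      = (min hi (a + n - 1) - max lo a + 1).toNat := by
  intro n
  induction n with
  | zero =>
    rw [show a + (0 : ℕ) = a by ring, PySem.List.pyRange_one_eq_nil le_rfl]
    simp
    omega
  | succ n ih =>
    rw [show a + ((n : ℕ) + 1 : ℕ) = (a + n) + 1 by push_cast; ring,
        PySem.List.pyRange_one_succ_right (by omega), List.map_append, List.sum_append, ih]
    simp only [List.map_cons, List.map_nil, List.sum_cons, List.sum_nil]
    split_ifs with h
    · omega
    · omega

theorem pv_count_window (x : Int × Int) (i k : Int) :
    (pvLexPairs i (i + k)).count x = (if i ≤ x.1 ∧ x.1 < x.2 ∧ x.2 < i + k then 1 else 0) := by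
  split_ifs with h
  · exact List.count_eq_one_of_mem (pv_nodup_lexPairs (i + k - i).toNat i (i + k) rfl)
      ((pv_mem_lexPairs x i (i + k)).2 h)
  · exact List.count_eq_zero.2 (fun c => h ((pv_mem_lexPairs x i (i + k)).1 c))

theorem pv_count_pvPA (W k : Int) (hW : 0 ≤ W) (p q : Int)
    (h0 : 0 ≤ p) (hpq : p < q) (hq1 : q ≤ p + k - 1) (hq2 : q ≤ W + k - 1) :
    ((pvPA W k).count (p, q) : Int) = min p W - max 0 (q - k + 1) + 1 := by
  rw [pvPA, List.count_flatMap]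
  have hcong : ∀ i ∈ PySem.List.pyRange 0 (W + 1) 1,
      (List.count (p, q) ∘ fun i => pvLexPairs i (i + k)) i
        = (fun j => if q - k + 1 ≤ j ∧ j ≤ p then (1 : ℕ) else 0) i := by
    intro i _
    simp only [Function.comp_apply]
    rw [pv_count_window]
    congr 1
    simp only [eq_iff_iff]
    omega
  rw [List.map_congr_left hcong]
  have h01 : (0 : Int) + ((W + 1).toNat : ℕ) = W + 1 := by omega
  rw [show PySem.List.pyRange 0 (W + 1) 1 = PySem.List.pyRange 0 (0 + ((W + 1).toNat : ℕ)) 1 by rw [h01]]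
  rw [pv_sum_indicator]
  omega

theorem pv_map_range_slice {α : Type} (toks : List α) (d : α) (a b : Int)
    (h0 : 0 ≤ a) (hb0 : 0 ≤ b) (hb : b ≤ toks.length) :
    (PySem.List.pyRange a b 1).map (fun j => PySem.List.pyGetD toks j d)
      = PySem.List.slice toks (some a) (some b) := by
  rw [PySem.List.slice_toNat _ h0 hb0]
  apply List.ext_getElem
  · simp only [List.length_map, PySem.List.length_pyRange_one, List.length_take,
      List.length_drop]
    omega
  · intro i h1 h2
    simp only [List.length_map, PySem.List.length_pyRange_one] at h1
    simp only [List.getElem_map, PySem.List.getElem_pyRange_one, List.getElem_take,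
      List.getElem_drop]
    rw [PySem.List.pyGetD_eq_getElem toks d (by omega) (by push_cast; omega)]
    congr 1
    omega

def pvGKey (toks : List String) (x : Int × Int) : String :=
  "token_pair=" ++ PySem.List.pyGetD toks x.1 "" ++ "__" ++ PySem.List.pyGetD toks x.2 ""

theorem pv_stepA_bump (d : PySem.Dict String Int) (s : String) :
    (if d.contains s then d.insert s (d.getD s 0 + 1) else d.insert s 1) = pvBump d (s, 1) := by
  by_cases h : d.contains s = true
  · rw [if_pos h]; rfl
  · rw [if_neg h, pvBump,
        PySem.Dict.getD_of_not_contains d 0 (by simpa using h)]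
    norm_num

theorem pvA3_eq (toks : List String) (k : Int) (h2 : 2 ≤ k) (hkL : k ≤ (toks.length : Int))
    (d : PySem.Dict String Int) :
    List.foldl (fun d i =>
        List.foldl (fun d co =>
          if d.contains ("token_pair=" ++ co.1 ++ "__" ++ co.2) = true then
            d.insert ("token_pair=" ++ co.1 ++ "__" ++ co.2) (d.getD ("token_pair=" ++ co.1 ++ "__" ++ co.2) 0 + 1)
          else d.insert ("token_pair=" ++ co.1 ++ "__" ++ co.2) 1)
          d (pvCombos2 (PySem.List.slice toks (some i) (some (i + k))))) d (PySem.List.pyRange 0 ((toks.length : Int) - k + 1) 1)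
    = List.foldl pvBump d
        ((pvPA ((toks.length : Int) - k) k).map (fun x => (pvGKey toks x, (1 : Int)))) := by
  have hstep : ∀ (acc : PySem.Dict String Int), ∀ i ∈ PySem.List.pyRange 0 ((toks.length : Int) - k + 1) 1,
      (fun d i =>
        List.foldl (fun d co =>
          if d.contains ("token_pair=" ++ co.1 ++ "__" ++ co.2) = true then
            d.insert ("token_pair=" ++ co.1 ++ "__" ++ co.2) (d.getD ("token_pair=" ++ co.1 ++ "__" ++ co.2) 0 + 1)
          else d.insert ("token_pair=" ++ co.1 ++ "__" ++ co.2) 1)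
          d (pvCombos2 (PySem.List.slice toks (some i) (some (i + k))))) acc i
      = (fun d i => List.foldl pvBump d ((pvLexPairs i (i + k)).map (fun x => (pvGKey toks x, (1 : Int))))) acc i := by
    intro acc i hi
    rw [PySem.List.mem_pyRange_one] at hi
    show List.foldl (fun d co =>
          if d.contains ("token_pair=" ++ co.1 ++ "__" ++ co.2) = true then
            d.insert ("token_pair=" ++ co.1 ++ "__" ++ co.2) (d.getD ("token_pair=" ++ co.1 ++ "__" ++ co.2) 0 + 1)
          else d.insert ("token_pair=" ++ co.1 ++ "__" ++ co.2) 1)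
          acc (pvCombos2 (PySem.List.slice toks (some i) (some (i + k))))
      = List.foldl pvBump acc ((pvLexPairs i (i + k)).map (fun x => (pvGKey toks x, (1 : Int))))
    rw [← pv_map_range_slice toks "" i (i + k) (by omega) (by omega) (by omega),
        pvCombos2_map, pvCombos2_pyRange (i + k - i).toNat i (i + k) rfl,
        List.foldl_map, List.foldl_map]
    apply PySem.List.foldl_congr_mem
    intro acc' x _
    show (if _ then _ else _) = _
    rw [pv_stepA_bump]
    rfl
  rw [PySem.List.foldl_congr_mem _ _ _ d hstep]
  rw [pvPA, List.map_flatMap, List.foldl_flatMap]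

theorem pvCombos2_short {α : Type} (l : List α) (h : l.length ≤ 1) : pvCombos2 l = [] := by
  match l with
  | [] => rfl
  | [x] => rfl
  | x :: y :: r => simp at h

theorem pvA3_trivial (toks : List String) (k : Int)
    (hpre : 0 ≤ k ∨ (toks.length : Int) + k ≤ 1)
    (hng : ¬(2 ≤ k ∧ k ≤ (toks.length : Int))) (d : PySem.Dict String Int) :
    List.foldl (fun d i =>
        List.foldl (fun d co =>
          if d.contains ("token_pair=" ++ co.1 ++ "__" ++ co.2) = true then
            d.insert ("token_pair=" ++ co.1 ++ "__" ++ co.2) (d.getD ("token_pair=" ++ co.1 ++ "__" ++ co.2) 0 + 1)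
          else d.insert ("token_pair=" ++ co.1 ++ "__" ++ co.2) 1)
          d (pvCombos2 (PySem.List.slice toks (some i) (some (i + k))))) d (PySem.List.pyRange 0 ((toks.length : Int) - k + 1) 1) = d := by
  rcases not_and_or.1 hng with hs | hL
  · have hstep : ∀ (acc : PySem.Dict String Int), ∀ i ∈ PySem.List.pyRange 0 ((toks.length : Int) - k + 1) 1,
        (fun d i =>
        List.foldl (fun d co =>
          if d.contains ("token_pair=" ++ co.1 ++ "__" ++ co.2) = true then
            d.insert ("token_pair=" ++ co.1 ++ "__" ++ co.2) (d.getD ("token_pair=" ++ co.1 ++ "__" ++ co.2) 0 + 1)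
          else d.insert ("token_pair=" ++ co.1 ++ "__" ++ co.2) 1)
          d (pvCombos2 (PySem.List.slice toks (some i) (some (i + k))))) acc i
        = (fun (d : PySem.Dict String Int) (_ : Int) => d) acc i := by
      intro acc i hi
      rw [PySem.List.mem_pyRange_one] at hi
      have hsl : (PySem.List.slice toks (some i) (some (i + k))).length ≤ 1 := by
        rw [PySem.List.length_slice]
        simp only [PySem.List.clampIdx]
        split_ifs <;> omega
      show List.foldl _ acc (pvCombos2 (PySem.List.slice toks (some i) (some (i + k)))) = acc
      rw [pvCombos2_short _ hsl]
      rfl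
    rw [PySem.List.foldl_congr_mem _ _ _ d hstep, List.foldl_fixed]
  · rw [PySem.List.pyRange_one_eq_nil (by omega)]
    rfl

theorem pvLexPairs_zero_k (k : Int) (hk : 1 ≤ k) :
    pvLexPairs 0 k = (PySem.List.pyRange 0 (k - 1) 1).flatMap
      (fun p => (PySem.List.pyRange (p + 1) k 1).map (fun q => ((p, q) : Int × Int))) := by
  rw [pvLexPairs]
  have hsplit : PySem.List.pyRange 0 k 1 = PySem.List.pyRange 0 (k - 1) 1 ++ [k - 1] := by
    have h := PySem.List.pyRange_one_succ_right (a := 0) (b := k - 1) (by omega)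
    rw [show k - 1 + 1 = k by ring] at h
    exact h
  rw [hsplit, List.flatMap_append]
  have : ∀ p ∈ ([k - 1] : List Int),
      (PySem.List.pyRange (p + 1) k 1).map (fun q => ((p, q) : Int × Int)) = [] := by
    intro p hp
    simp only [List.mem_singleton] at hp
    subst hp
    rw [show k - 1 + 1 = k by ring, PySem.List.pyRange_one_eq_nil le_rfl]
    rfl
  rw [List.flatMap_congr this]
  simp

theorem pvB3_block1 (toks : List String) (k : Int) (h2 : 2 ≤ k) (hkL : k ≤ (toks.length : Int))
    (d : PySem.Dict String Int) :
    List.foldl (fun d p =>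
        List.foldl (fun d q =>
          d.insert ("token_pair=" ++ PySem.List.pyGetD toks p "" ++ "__" ++ PySem.List.pyGetD toks q "")
            (d.getD ("token_pair=" ++ PySem.List.pyGetD toks p "" ++ "__" ++ PySem.List.pyGetD toks q "") 0
              + (min p ((toks.length : Int) - k) + 1)))
          d (PySem.List.pyRange (p + 1) k 1))
      d (PySem.List.pyRange 0 (k - 1) 1)
    = List.foldl pvBump d ((pvLexPairs 0 (0 + k)).map
        (fun y => (pvGKey toks y, ((pvPA ((toks.length : Int) - k) k).count y : Int)))) := by
  set L : Int := (toks.length : Int) with hL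
  set W : Int := L - k with hW
  have hW0 : 0 ≤ W := by omega
  rw [show (0 : Int) + k = k by ring, pvLexPairs_zero_k k (by omega),
      List.map_flatMap, List.foldl_flatMap]
  apply PySem.List.foldl_congr_mem
  intro acc p hp
  rw [PySem.List.mem_pyRange_one] at hp
  show (PySem.List.pyRange (p + 1) k 1).foldl _ acc
    = List.foldl pvBump acc (((PySem.List.pyRange (p + 1) k 1).map (fun q => ((p, q) : Int × Int))).map
        (fun y => (pvGKey toks y, ((pvPA W k).count y : Int))))
  rw [List.map_map, List.foldl_map]
  apply PySem.List.foldl_congr_mem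
  intro acc' q hq
  rw [PySem.List.mem_pyRange_one] at hq
  have hv : ((pvPA W k).count (p, q) : Int) = min p W + 1 := by
    rw [pv_count_pvPA W k hW0 p q (by omega) (by omega) (by omega) (by omega)]
    omega
  show acc'.insert ("token_pair=" ++ PySem.List.pyGetD toks p "" ++ "__" ++ PySem.List.pyGetD toks q "")
      ((acc'.getD ("token_pair=" ++ PySem.List.pyGetD toks p "" ++ "__" ++ PySem.List.pyGetD toks q "") 0) + (min p W + 1))
    = pvBump acc' (pvGKey toks (p, q), ((pvPA W k).count (p, q) : Int))
  rw [hv]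
  rfl

theorem pvB3_block2 (toks : List String) (k : Int) (h2 : 2 ≤ k) (_hkL : k ≤ (toks.length : Int))
    (m : PySem.Dict String Int) :
    List.foldl (fun d i =>
        List.foldl (fun d p =>
          d.insert ("token_pair=" ++ PySem.List.pyGetD toks p "" ++ "__" ++ PySem.List.pyGetD toks (i + k - 1) "")
            (d.getD ("token_pair=" ++ PySem.List.pyGetD toks p "" ++ "__" ++ PySem.List.pyGetD toks (i + k - 1) "") 0
              + (min p ((toks.length : Int) - k) - i + 1)))
          d (PySem.List.pyRange i (i + k - 1) 1))
      m (PySem.List.pyRange 1 (((toks.length : Int) - k) + 1) 1)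
    = List.foldl pvBump m (((PySem.List.pyRange 1 (((toks.length : Int) - k) + 1) 1).flatMap
        (fun j => pvNews j k)).map
        (fun y => (pvGKey toks y, ((pvPA ((toks.length : Int) - k) k).count y : Int)))) := by
  set L : Int := (toks.length : Int) with hL
  set W : Int := L - k with hW
  have hW0 : 0 ≤ W := by omega
  rw [List.map_flatMap, List.foldl_flatMap]
  apply PySem.List.foldl_congr_mem
  intro acc i hi
  rw [PySem.List.mem_pyRange_one] at hi
  show (PySem.List.pyRange i (i + k - 1) 1).foldl _ acc
    = List.foldl pvBump acc ((pvNews i k).map (fun y => (pvGKey toks y, ((pvPA W k).count y : Int))))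
  rw [pvNews, List.map_map, List.foldl_map]
  apply PySem.List.foldl_congr_mem
  intro acc' p hp
  rw [PySem.List.mem_pyRange_one] at hp
  have hv : ((pvPA W k).count (p, i + k - 1) : Int) = min p W - i + 1 := by
    rw [pv_count_pvPA W k hW0 p (i + k - 1) (by omega) (by omega) (by omega) (by omega)]
    omega
  show acc'.insert ("token_pair=" ++ PySem.List.pyGetD toks p "" ++ "__" ++ PySem.List.pyGetD toks (i + k - 1) "")
      ((acc'.getD ("token_pair=" ++ PySem.List.pyGetD toks p "" ++ "__" ++ PySem.List.pyGetD toks (i + k - 1) "") 0) + (min p W - i + 1))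
    = pvBump acc' (pvGKey toks (p, i + k - 1), ((pvPA W k).count (p, i + k - 1) : Int))
  rw [hv]
  rfl

theorem pvB3_eq (toks : List String) (k : Int) (h2 : 2 ≤ k) (hkL : k ≤ (toks.length : Int))
    (d : PySem.Dict String Int) :
    List.foldl (fun d i =>
        List.foldl (fun d p =>
          d.insert ("token_pair=" ++ PySem.List.pyGetD toks p "" ++ "__" ++ PySem.List.pyGetD toks (i + k - 1) "")
            (d.getD ("token_pair=" ++ PySem.List.pyGetD toks p "" ++ "__" ++ PySem.List.pyGetD toks (i + k - 1) "") 0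
              + (min p ((toks.length : Int) - k) - i + 1)))
          d (PySem.List.pyRange i (i + k - 1) 1))
      (List.foldl (fun d p =>
        List.foldl (fun d q =>
          d.insert ("token_pair=" ++ PySem.List.pyGetD toks p "" ++ "__" ++ PySem.List.pyGetD toks q "")
            (d.getD ("token_pair=" ++ PySem.List.pyGetD toks p "" ++ "__" ++ PySem.List.pyGetD toks q "") 0
              + (min p ((toks.length : Int) - k) + 1)))
          d (PySem.List.pyRange (p + 1) k 1))
        d (PySem.List.pyRange 0 (k - 1) 1))
      (PySem.List.pyRange 1 (((toks.length : Int) - k) + 1) 1)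
    = List.foldl pvBump d ((pvFD (pvPA ((toks.length : Int) - k) k)).map
        (fun y => (pvGKey toks y, ((pvPA ((toks.length : Int) - k) k).count y : Int)))) := by
  rw [pvFD_pvPA k ((toks.length : Int) - k) h2 (by omega), List.map_append, List.foldl_append,
      pvB3_block1 toks k h2 hkL d, pvB3_block2 toks k h2 hkL]

theorem pv_np_fold (l : List String) : ∀ (n p : Int),
    l.foldl (fun np token =>
        let np := if PySem.Str.lower token ∈ pvNegWords then (np.1 + 1, np.2) else np
        if PySem.Str.lower token ∈ pvPosWords then (np.1, np.2 + 1) else np) (n, p)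
      = (n + (l.map (fun t => if PySem.Str.lower t ∈ pvNegWords then (1 : Int) else 0)).sum,
         p + (l.map (fun t => if PySem.Str.lower t ∈ pvPosWords then (1 : Int) else 0)).sum) := by
  induction l with
  | nil => intro n p; simp
  | cons t r ih =>
    intro n p
    simp only [List.foldl_cons, List.map_cons, List.sum_cons]
    split_ifs with h1 h2 h3 <;> simp only [ih] <;>
      refine Prod.ext ?_ ?_ <;> simp <;> ring

theorem pv_count_beq (y : Int × Int) (l : List (Int × Int)) :
    @List.count (Int × Int) instBEqOfDecidableEq y l = @List.count (Int × Int) instBEqProd y l := by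
  induction l with
  | nil => rfl
  | cons b t ih =>
    simp only [List.count_cons, ih]
    congr 1
    by_cases h : b = y <;> simp [h]

theorem pv_main (toks : List String) (k : Int)
    (hpre : 0 ≤ k ∨ (toks.length : Int) + k ≤ 1) :
    token_feature toks k = token_feature_alt toks k := by
  unfold token_feature token_feature_alt
  simp only [pv_np_fold toks 0 0, List.map_map, Function.comp_def, zero_add]
  have hnd : (((List.foldl (fun d token => d.insert ("has(" ++ token ++ ")") ((PySem.Dict.counter toks).getD token 0))
          PySem.Dict.empty toks).insert
        "neg_words" (List.map (fun t => if PySem.Str.lower t ∈ pvNegWords then (1 : Int) else 0) toks).sum).insert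
      "pos_words" (List.map (fun t => if PySem.Str.lower t ∈ pvPosWords then (1 : Int) else 0) toks).sum).keys.Nodup := by
    apply PySem.Dict.nodup_keys_insert
    apply PySem.Dict.nodup_keys_insert
    exact PySem.Dict.nodup_keys_foldl_insert_key toks (fun token => "has(" ++ token ++ ")") _ _
      PySem.Dict.nodup_keys_empty
  by_cases hg : 2 ≤ k ∧ k ≤ (toks.length : Int)
  · rw [if_pos hg]
    apply congrArg PySem.Dict.items
    rw [pvA3_eq toks k hg.1 hg.2, pvB3_eq toks k hg.1 hg.2,
        pv_G1 (pvGKey toks) (pvPA ((toks.length : Int) - k) k) _ hnd]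
    congr 1
    apply List.map_congr_left
    intro y _
    rw [pv_count_beq]
  · rw [if_neg hg]
    apply congrArg PySem.Dict.items
    exact pvA3_trivial toks k hpre hg _

-- ===== VERDICT (by name: the statement is the Claim_ definition above) =====
theorem token_feature_spec : Claim_equal_token_feature := by
  intro doc_tokens k _ hpre
  show token_feature doc_tokens k = token_feature_alt doc_tokens k
  exact pv_main doc_tokens k hpre
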